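-- pv_equiv track=rewrite | github.com/egeozsoy/Guess_Artikel_LSTM | create_article_features.py | convertWordToNumber
-- ===== SOURCE A (Python) =====
-- def convertWordToNumber(word):
--     numberWord = []
--     for i in range(0,30):
--         if len(word) > i:
--             numberWord.append(ord(word[i]))
--         else:
--             numberWord.insert(0 , 0)
--     return numberWord
-- ===== SOURCE B (Python) =====
-- def convertWordToNumber(word):
--     pad = max(0, 30 - len(word))
--     return [ord(word[j - pad]) if j >= pad else 0 for j in range(30)]
-- ===== Notes on version B (the rewrite author's own statement) =====
-- stated objective: alternative
-- what changed: Replaces A's accumulator loop (append ord / insert zero at front) by a closed-form positional construction: compute pad = max(0, 30 - len(word)) once and fill each of the 30 output slots independently as 0 or ord(word[j - pad]) by index arithmetic.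
import Mathlib
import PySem

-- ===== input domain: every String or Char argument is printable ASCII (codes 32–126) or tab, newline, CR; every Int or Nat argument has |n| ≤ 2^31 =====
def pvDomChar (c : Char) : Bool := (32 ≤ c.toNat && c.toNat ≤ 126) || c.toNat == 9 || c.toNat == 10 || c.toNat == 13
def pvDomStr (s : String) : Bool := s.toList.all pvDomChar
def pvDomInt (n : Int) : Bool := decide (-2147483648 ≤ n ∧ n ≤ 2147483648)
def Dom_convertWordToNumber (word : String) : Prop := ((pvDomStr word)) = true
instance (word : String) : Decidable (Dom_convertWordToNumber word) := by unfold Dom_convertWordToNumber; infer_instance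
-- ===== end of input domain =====

-- B discards A's accumulator loop (append ord / insert zero at front) and instead computes the
-- padding width once and fills each of the 30 output slots independently by index arithmetic.

-- ===== PORT A =====
def convertWordToNumber (word : String) : List Int :=
  (List.range 30).foldl
    (fun (numberWord : List Int) (i : Nat) =>
      if ((word.toList.length : Int)) > (i : Int) then
        numberWord ++ [((PySem.List.pyGetD word.toList (i : Int) ' ').toNat : Int)]
      else
        (0 : Int) :: numberWord)
    []

-- ===== PORT B =====
def convertWordToNumber_alt (word : String) : List Int :=
  let pad : Int := max 0 (30 - (word.toList.length : Int))
  (List.range 30).map (fun (j : Nat) =>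
    if pad ≤ (j : Int) then ((PySem.List.pyGetD word.toList ((j : Int) - pad) ' ').toNat : Int)
    else 0)

-- ===== PRECONDITION & SPEC =====
def Spec_convertWordToNumber (word : String) (out : List Int) : Prop := out = convertWordToNumber_alt word
instance (word : String) (out : List Int) : Decidable (Spec_convertWordToNumber word out) := by unfold Spec_convertWordToNumber; infer_instance

-- ===== CLAIM (what is proved, stated in full; the proofs are below) =====
def Claim_equal_convertWordToNumber : Prop := ∀ (word : String), Dom_convertWordToNumber word → Spec_convertWordToNumber word (convertWordToNumber word)

-- ===== LEMMAS AND PROOFS =====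

-- Loop invariant for A: after k iterations the accumulator is (k - min k n) zeros in front of
-- the ords of the first k characters.
theorem convertWordToNumber_loop (word : String) (k : Nat) :
    (List.range k).foldl
      (fun (numberWord : List Int) (i : Nat) =>
        if ((word.toList.length : Int)) > (i : Int) then
          numberWord ++ [((PySem.List.pyGetD word.toList (i : Int) ' ').toNat : Int)]
        else
          (0 : Int) :: numberWord)
      []
    = List.replicate (k - min k word.toList.length) 0
        ++ (word.toList.take k).map (fun c => (c.toNat : Int)) := by
  induction k with
  | zero => simp
  | succ k ih =>
    rw [List.range_succ, List.foldl_append, ih]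
    by_cases h : k < word.toList.length
    · have hcond : ((word.toList.length : Int)) > (k : Int) := by exact_mod_cast h
      simp only [List.foldl_cons, List.foldl_nil, if_pos hcond]
      have h1 : min k word.toList.length = k := by omega
      have h2 : min (k + 1) word.toList.length = k + 1 := by omega
      rw [h1, h2, show PySem.List.pyGetD word.toList (k : Int) ' ' = word.toList[((k : Int)).toNat] from
            PySem.List.pyGetD_eq_getElem (i := (k : Int)) word.toList ' ' (by omega) (by exact_mod_cast h)]
      rw [List.take_add_one]
      simp [List.getElem?_eq_getElem h]
      rw [List.take_add_one]
      simp [List.getElem?_map, List.getElem?_eq_getElem h]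
    · have hcond : ¬ ((word.toList.length : Int)) > (k : Int) := by
        simp only [not_lt]; exact_mod_cast Nat.le_of_not_lt h
      simp only [List.foldl_cons, List.foldl_nil, if_neg hcond]
      have h1 : min k word.toList.length = word.toList.length := by omega
      have h2 : min (k + 1) word.toList.length = word.toList.length := by omega
      have h3 : word.toList.take k = word.toList := List.take_of_length_le (by omega)
      have h4 : word.toList.take (k + 1) = word.toList := List.take_of_length_le (by omega)
      rw [h1, h2, h3, h4]
      have h5 : k + 1 - word.toList.length = (k - word.toList.length) + 1 := by omega
      rw [h5, List.replicate_succ]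
      simp

-- B's positional formula equals the padded-ords normal form.
theorem convertWordToNumber_alt_eq (word : String) :
    convertWordToNumber_alt word
    = List.replicate (30 - min 30 word.toList.length) 0
        ++ (word.toList.take 30).map (fun c => (c.toNat : Int)) := by
  unfold convertWordToNumber_alt
  set L := word.toList with hL
  set n := L.length with hn
  set p : Nat := 30 - min 30 n with hp
  have hpad : max 0 (30 - (n : Int)) = (p : Int) := by omega
  apply List.ext_getElem
  · simp [List.length_replicate, List.length_take]
    omega
  · intro i hi hi'
    have hi30 : i < 30 := by simpa using hi
    rw [List.getElem_map, List.getElem_range]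
    rw [hpad]
    by_cases h : i < p
    · have hc : ¬ ((p : Int) ≤ (i : Int)) := by exact_mod_cast Nat.not_le_of_lt h
      rw [if_neg hc]
      rw [List.getElem_append_left (by simpa using h)]
      simp
    · have hip : p ≤ i := Nat.le_of_not_lt h
      have hc : ((p : Int) ≤ (i : Int)) := by exact_mod_cast hip
      rw [if_pos hc]
      have hidx : (i : Int) - (p : Int) = ((i - p : Nat) : Int) := by omega
      have hlt : i - p < n := by omega
      rw [hidx, show PySem.List.pyGetD L ((i - p : Nat) : Int) ' ' = L[(((i - p : Nat) : Int)).toNat] from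
            PySem.List.pyGetD_eq_getElem _ ' ' (by omega) (by exact_mod_cast hlt)]
      rw [List.getElem_append_right (by simpa using hip)]
      simp [List.getElem_take]

-- ===== VERDICT (by name: the statement is the Claim_ definition above) =====
theorem convertWordToNumber_spec : Claim_equal_convertWordToNumber := by
  intro word _
  unfold Spec_convertWordToNumber convertWordToNumber
  rw [convertWordToNumber_loop, convertWordToNumber_alt_eq]
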